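-- pv_equiv track=rewrite | github.com/kjhmoon/kjhmoon_coding | 프로그래머스/0/181893. 배열 조각하기/배열 조각하기.py | solution
-- ===== SOURCE A (Python) =====
-- def solution(arr, query):
--     for i in range(len(query)):
--         if i % 2 == 0:
--             num = query[i]
--             arr = arr[0:num+1]
--         else:
--             num = query[i]
--             arr = arr[num:]
--     return arr
-- ===== SOURCE B (Python) =====
-- def solution(arr, query):
--     # Track the surviving window [lo, hi) of the original array across all
--     # queries, then slice once at the end.
--     lo, hi = 0, len(arr)
--     for i, q in enumerate(query):
--         n = hi - lo
--         if i % 2 == 0: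
--             stop = q + 1
--             stop = max(0, n + stop) if stop < 0 else min(n, stop)
--             hi = lo + stop
--         else:
--             start = max(0, n + q) if q < 0 else min(n, q)
--             lo = lo + start
--     return arr[lo:hi]
-- ===== Notes on version B (the rewrite author's own statement) =====
-- stated objective: alternative
-- what changed: Instead of materialising a new list slice per query, B tracks the surviving [lo,hi) index window across all queries and slices the original array once at the end; it trades A's C-level slice copies for pure index arithmetic.
import Mathlib
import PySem

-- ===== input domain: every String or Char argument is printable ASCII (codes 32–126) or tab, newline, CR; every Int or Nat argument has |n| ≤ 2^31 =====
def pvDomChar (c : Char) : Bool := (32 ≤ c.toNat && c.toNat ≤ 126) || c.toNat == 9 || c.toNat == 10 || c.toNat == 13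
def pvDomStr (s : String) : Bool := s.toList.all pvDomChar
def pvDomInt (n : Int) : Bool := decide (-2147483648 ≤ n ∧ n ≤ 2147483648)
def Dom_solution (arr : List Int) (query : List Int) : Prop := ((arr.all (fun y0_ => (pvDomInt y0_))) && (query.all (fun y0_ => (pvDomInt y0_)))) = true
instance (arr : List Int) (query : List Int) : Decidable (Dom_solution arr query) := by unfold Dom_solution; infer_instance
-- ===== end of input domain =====

-- B replaces A's per-query list slicing with a single [lo,hi) index-window scan and one final slice (alternative algorithm, same measured cost).


-- ===== PORT A =====
-- for i in range(len(query)): read query[i]  ≡  fold over enumerate(query); each step reslices the list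
def solution (arr : List Int) (query : List Int) : List Int :=
  (PySem.List.enumerate query).foldl
    (fun a p =>
      if PySem.Int.mod p.1 2 == 0 then
        PySem.List.slice a (some 0) (some (p.2 + 1))
      else
        PySem.List.slice a (some p.2) none)
    arr

-- ===== PORT B =====
-- one pass computing the surviving window (lo, hi), then a single slice
def solution_alt (arr : List Int) (query : List Int) : List Int :=
  let p :=
    (PySem.List.enumerate query).foldl
      (fun s iq =>
        let n := s.2 - s.1
        if PySem.Int.mod iq.1 2 == 0 then
          let stop := iq.2 + 1
          let stop := if stop < 0 then max 0 (n + stop) else min n stop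
          (s.1, s.1 + stop)
        else
          let start := if iq.2 < 0 then max 0 (n + iq.2) else min n iq.2
          (s.1 + start, s.2))
      (0, (arr.length : Int))
  PySem.List.slice arr (some p.1) (some p.2)

-- ===== PRECONDITION & SPEC =====
def Spec_solution (arr : List Int) (query : List Int) (out : List Int) : Prop := out = solution_alt arr query
instance (arr : List Int) (query : List Int) (out : List Int) : Decidable (Spec_solution arr query out) := by unfold Spec_solution; infer_instance

-- ===== CLAIM (what is proved, stated in full; the proofs are below) =====
def Claim_equal_solution : Prop := ∀ (arr : List Int) (query : List Int), Dom_solution arr query → Spec_solution arr query (solution arr query)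

-- ===== LEMMAS AND PROOFS =====

-- B's clamp arithmetic computes exactly Python's slice-index clamp.
theorem clamp_eq (m : Nat) (k : Int) :
    (if k < 0 then max 0 ((m : Int) + k) else min (m : Int) k)
      = ((PySem.List.clampIdx m k : Nat) : Int) := by
  unfold PySem.List.clampIdx
  split_ifs <;> omega

-- the two step functions, named for the invariant proof
def stepA : List Int → (Int × Int) → List Int :=
  fun a p =>
    if PySem.Int.mod p.1 2 == 0 then
      PySem.List.slice a (some 0) (some (p.2 + 1))
    else
      PySem.List.slice a (some p.2) none

def stepB : (Int × Int) → (Int × Int) → (Int × Int) :=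
  fun s iq =>
    let n := s.2 - s.1
    if PySem.Int.mod iq.1 2 == 0 then
      let stop := iq.2 + 1
      let stop := if stop < 0 then max 0 (n + stop) else min n stop
      (s.1, s.1 + stop)
    else
      let start := if iq.2 < 0 then max 0 (n + iq.2) else min n iq.2
      (s.1 + start, s.2)

theorem slice_window (xs : List Int) (lo hi : Int) (h0 : 0 ≤ lo) (h1 : lo ≤ hi) :
    PySem.List.slice xs (some lo) (some hi)
      = (xs.drop lo.toNat).take (hi.toNat - lo.toNat) :=
  PySem.List.slice_toNat xs h0 (le_trans h0 h1)

-- cur[0:b] = take (clampIdx |cur| b) cur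
theorem slice_take (cur : List Int) (b : Int) :
    PySem.List.slice cur (some 0) (some b)
      = cur.take (PySem.List.clampIdx cur.length b) := by
  simp [PySem.List.slice, PySem.List.clampIdx]

-- loop invariant: A's re-sliced list is the window B tracks
theorem loop_inv (xs : List Int) (q : List (Int × Int)) :
    ∀ (lo hi : Int), 0 ≤ lo → lo ≤ hi → hi ≤ (xs.length : Int) →
      (0 ≤ (q.foldl stepB (lo, hi)).1 ∧
       (q.foldl stepB (lo, hi)).1 ≤ (q.foldl stepB (lo, hi)).2 ∧
       (q.foldl stepB (lo, hi)).2 ≤ (xs.length : Int)) ∧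
      q.foldl stepA (PySem.List.slice xs (some lo) (some hi))
        = PySem.List.slice xs (some (q.foldl stepB (lo, hi)).1)
            (some (q.foldl stepB (lo, hi)).2) := by
  induction q with
  | nil => intro lo hi h0 h1 h2; exact ⟨⟨h0, h1, h2⟩, rfl⟩
  | cons p rest ih =>
    intro lo hi h0 h1 h2
    have hcur : (PySem.List.slice xs (some lo) (some hi)).length = (hi - lo).toNat := by
      rw [slice_window xs lo hi h0 h1]
      simp [List.length_take, List.length_drop]
      omega
    by_cases hpar : PySem.Int.mod p.1 2 == 0
    · -- even step: cur[0 : p.2+1]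
      set m : Nat := (hi - lo).toNat with hm
      have hc : ((PySem.List.clampIdx m (p.2 + 1) : Nat) : Int)
          = (if p.2 + 1 < 0 then max 0 ((m : Int) + (p.2 + 1)) else min (m : Int) (p.2 + 1)) :=
        (clamp_eq m (p.2 + 1)).symm
      have hcle : PySem.List.clampIdx m (p.2 + 1) ≤ m := by
        unfold PySem.List.clampIdx; split_ifs <;> omega
      have hAstep : stepA (PySem.List.slice xs (some lo) (some hi)) p
          = PySem.List.slice xs (some lo) (some (lo + ((PySem.List.clampIdx m (p.2 + 1) : Nat) : Int))) := by
        simp only [stepA, hpar, if_true, slice_take, hcur]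
        rw [slice_window xs lo hi h0 h1,
            slice_window xs lo _ h0 (by omega), List.take_take]
        congr 1
        omega
      have hBstep : stepB (lo, hi) p
          = (lo, lo + ((PySem.List.clampIdx m (p.2 + 1) : Nat) : Int)) := by
        simp only [stepB, hpar, if_true]
        rw [hc.symm] at *
        simp only [hm]
        congr 1
        rw [← clamp_eq m (p.2 + 1), hm]
        congr 1 <;> omega
      rw [List.foldl_cons, List.foldl_cons, hAstep, hBstep]
      exact ih lo _ h0 (by omega) (by omega)
    · -- odd step: cur[p.2 :]
      set m : Nat := (hi - lo).toNat with hm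
      have hcle : PySem.List.clampIdx m p.2 ≤ m := by
        unfold PySem.List.clampIdx; split_ifs <;> omega
      have hAstep : stepA (PySem.List.slice xs (some lo) (some hi)) p
          = PySem.List.slice xs (some (lo + ((PySem.List.clampIdx m p.2 : Nat) : Int))) (some hi) := by
        simp only [stepA, hpar, Bool.false_eq_true, if_false, PySem.List.slice_some_none, hcur]
        rw [slice_window xs lo hi h0 h1,
            slice_window xs _ hi (by omega) (by omega),
            List.drop_take, List.drop_drop]
        congr 1
        · omega
        · congr 1; omega
      have hBstep : stepB (lo, hi) p
          = (lo + ((PySem.List.clampIdx m p.2 : Nat) : Int), hi) := by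
        simp only [stepB, hpar, Bool.false_eq_true, if_false]
        congr 1
        rw [← clamp_eq m p.2, hm]
        congr 1 <;> omega
      rw [List.foldl_cons, List.foldl_cons, hAstep, hBstep]
      exact ih _ hi (by omega) (by omega) h2

-- ===== VERDICT (by name: the statement is the Claim_ definition above) =====
theorem solution_spec : Claim_equal_solution := by
  intro arr query _
  unfold Spec_solution solution solution_alt
  have h := (loop_inv arr (PySem.List.enumerate query) 0 (arr.length : Int)
      le_rfl (by exact_mod_cast Nat.zero_le _) le_rfl).2
  have hfull : PySem.List.slice arr (some 0) (some (arr.length : Int)) = arr := by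
    rw [PySem.List.slice_zero_start, PySem.List.slice_to_natCast]
    simp
  rw [hfull] at h
  exact h
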